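-- pv_equiv track=rewrite | github.com/tcl326/advent-of-code-2020 | day18/operation_order.py | evaluate_plus
-- ===== SOURCE A (Python) =====
-- def basic_ops(ops, num1, num2):
--     if ops == "+":
--         return num1 + num2
--     elif ops == "*":
--         return num1 * num2
--     return None
--
-- def evaluate_plus(calculation):
--     nums = []
--     ops = []
--     i = 0
--     while i < len(calculation):
--         c = calculation[i]
--         if c == " ":
--             i += 1
--             continue
--         elif c.isdigit():
--             num = int(c)
--             while i < len(calculation) - 1 and calculation[i + 1].isdigit():
--                 num = num * 10 + int(calculation[i + 1])
--                 i += 1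
--             nums.append(num)
--         elif c == "(":
--             ops.append(c)
--         elif c == ")":
--             while ops[-1] != "(":
--                 nums.append(basic_ops(ops.pop(), nums.pop(), nums.pop()))
--             ops.pop()
--         elif c in {"+", "*"}:
--             while len(ops) > 0 and precedence(c, ops[-1]) and ops[-1] in {"+", "*"}:
--                 nums.append(basic_ops(ops.pop(), nums.pop(), nums.pop()))
--             ops.append(c)
--         i += 1
--     while ops:
--         nums.append(basic_ops(ops.pop(), nums.pop(), nums.pop()))
--     return nums[0]
--
-- def precedence(current_ops, op_from_ops):
--     if current_ops == "+" and op_from_ops == "*":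
--         return False
--     return True
-- ===== SOURCE B (Python) =====
-- def _tokenize(s):
--     toks = []
--     num = None
--     for ch in s:
--         if ch.isdigit():
--             num = (0 if num is None else num) * 10 + int(ch)
--         else:
--             if num is not None:
--                 toks.append(num)
--                 num = None
--             if ch in "+*()":
--                 toks.append(ch)
--     if num is not None:
--         toks.append(num)
--     return toks
--
-- def _factor(toks, i):
--     if i < len(toks) and isinstance(toks[i], int):
--         return toks[i], i + 1
--     if i < len(toks) and toks[i] == "(":
--         val, i = _expr(toks, i + 1)
--         if i >= len(toks) or toks[i] != ")":
--             raise ValueError("expected )")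
--         return val, i + 1
--     raise ValueError("expected number or (")
--
-- def _term(toks, i):
--     val, i = _factor(toks, i)
--     while i < len(toks) and toks[i] == "+":
--         rhs, i = _factor(toks, i + 1)
--         val = val + rhs
--     return val, i
--
-- def _expr(toks, i):
--     val, i = _term(toks, i)
--     while i < len(toks) and toks[i] == "*":
--         rhs, i = _term(toks, i + 1)
--         val = val * rhs
--     return val, i
--
-- def evaluate_plus(calculation):
--     val, _ = _expr(_tokenize(calculation), 0)
--     return val
-- ===== Notes on version B (the rewrite author's own statement) =====
-- stated objective: alternative
-- what changed: Replaced A's two-stack shunting-yard evaluator (interleaved with character scanning) by a separate tokenizer plus a recursive-descent parser whose levels encode the inverted precedence (+ binds tighter than *). Pre_ excludes malformed inputs whose token stream is not one complete well-formed expression (unbalanced parentheses, missing operands/operators, trailing tokens): there A raises IndexError or returns an accidental stack residue, and both behaviours on such leftovers are equally defensible; B's parser raises ValueError or returns the leading expression's value.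
-- outside the precondition, e.g. on evaluate_plus('(1 2)'): A returns 1, B raises ValueError; on evaluate_plus('3+4 7'): A returns 3, B returns 7; on evaluate_plus('1 2'): A returns 1, B returns 1
import Mathlib
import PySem

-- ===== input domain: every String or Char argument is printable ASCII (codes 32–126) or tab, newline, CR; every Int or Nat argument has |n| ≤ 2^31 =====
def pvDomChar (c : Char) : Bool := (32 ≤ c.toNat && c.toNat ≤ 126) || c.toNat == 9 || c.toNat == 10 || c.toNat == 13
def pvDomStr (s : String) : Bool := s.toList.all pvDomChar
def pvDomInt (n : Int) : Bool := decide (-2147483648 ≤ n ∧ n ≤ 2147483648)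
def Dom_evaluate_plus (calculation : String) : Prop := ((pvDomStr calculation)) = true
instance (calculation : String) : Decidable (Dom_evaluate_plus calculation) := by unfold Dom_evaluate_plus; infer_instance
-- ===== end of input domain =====

-- B replaces A's two-stack shunting-yard evaluator by a tokenizer plus a recursive-descent
-- parser (levels encode the inverted precedence: + binds tighter than *); alternative
-- algorithm, same asymptotic cost.

-- ===== PORT A =====

-- basic_ops: Python returns None for an unknown operator (only reachable on malformed
-- input, outside Pre_); the port returns 0 there.
def basicOps (o : Char) (num1 num2 : Int) : Int :=
  if o = '+' then num1 + num2
  else if o = '*' then num1 * num2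
  else 0

def precedenceA (current_ops op_from_ops : Char) : Bool :=
  if current_ops = '+' ∧ op_from_ops = '*' then false else true

def digitVal (c : Char) : Int := (c.toNat : Int) - 48

-- the inner `while … calculation[i+1].isdigit()` loop of A
def scanNum : Int → List Char → Int × List Char
  | num, [] => (num, [])
  | num, c :: cs => if c.isDigit then scanNum (num * 10 + digitVal c) cs else (num, c :: cs)

theorem scanNum_len_le (num : Int) (cs : List Char) : (scanNum num cs).2.length ≤ cs.length := by
  induction cs generalizing num with
  | nil => simp [scanNum]
  | cons c cs ih =>
    simp only [scanNum]
    split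
    · exact Nat.le_trans (ih _) (Nat.le_succ _)
    · exact Nat.le_refl _

-- the `while ops[-1] != "("` loop of the ")" branch (Python raises IndexError on an
-- empty ops stack; that input is outside Pre_)
def rpFlush : List Int → List Char → List Int × List Char
  | nums, [] => (nums, [])
  | nums, o :: rest =>
    if o = '(' then (nums, rest)
    else rpFlush (basicOps o (nums.headD 0) (nums.tail.headD 0) :: nums.tail.tail) rest

-- the `while len(ops) > 0 and precedence(…) and ops[-1] in {"+","*"}` loop
def opFlush (c : Char) : List Int → List Char → List Int × List Char
  | nums, [] => (nums, [])
  | nums, o :: rest =>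
    if precedenceA c o = true ∧ (o = '+' ∨ o = '*') then
      opFlush c (basicOps o (nums.headD 0) (nums.tail.headD 0) :: nums.tail.tail) rest
    else (nums, o :: rest)

-- A's main character loop; stacks grow at the head (Python appends at the end)
def aLoop : List Char → List Int → List Char → List Int × List Char
  | [], nums, ops => (nums, ops)
  | c :: cs, nums, ops =>
    if c = ' ' then aLoop cs nums ops
    else if c.isDigit then
      let p := scanNum (digitVal c) cs
      aLoop p.2 (p.1 :: nums) ops
    else if c = '(' then aLoop cs nums (c :: ops)
    else if c = ')' then
      let p := rpFlush nums ops
      aLoop cs p.1 p.2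
    else if c = '+' ∨ c = '*' then
      let p := opFlush c nums ops
      aLoop cs p.1 (c :: p.2)
    else aLoop cs nums ops
termination_by cs _ _ => cs.length
decreasing_by
  all_goals simp
  exact scanNum_len_le _ _

-- the final `while ops:` flush
def finalFlush : List Int → List Char → List Int
  | nums, [] => nums
  | nums, o :: rest => finalFlush (basicOps o (nums.headD 0) (nums.tail.headD 0) :: nums.tail.tail) rest

-- `return nums[0]`: the bottom of the stack (Python raises IndexError on an empty list;
-- outside Pre_); with head-growing stacks that is the last element
def evaluate_plus (calculation : String) : Int :=
  let p := aLoop calculation.toList [] []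
  (finalFlush p.1 p.2).getLastD 0

-- ===== PORT B =====

inductive Tok where
  | num : Int → Tok
  | plus : Tok
  | mul : Tok
  | lp : Tok
  | rp : Tok
deriving DecidableEq, Repr

-- B's _tokenize: a single pass with a pending-number accumulator; digit runs become
-- numbers, "+*()" become symbols, everything else is skipped
def pendList : Option Int → List Tok
  | some a => [Tok.num a]
  | none => []

def symList (c : Char) : List Tok :=
  if c = '+' then [Tok.plus]
  else if c = '*' then [Tok.mul]
  else if c = '(' then [Tok.lp]
  else if c = ')' then [Tok.rp]
  else []

def tokenize0 : Option Int → List Char → List Tok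
  | pend, [] => pendList pend
  | pend, c :: cs =>
    if c.isDigit then tokenize0 (some ((pend.getD 0) * 10 + digitVal c)) cs
    else pendList pend ++ symList c ++ tokenize0 none cs

def tokenize (cs : List Char) : List Tok := tokenize0 none cs

-- B's recursive-descent parser; a remaining-suffix list replaces the Python index, and
-- `none` is Python's raised ValueError. The subtype bound carries the fact that a parse
-- consumes input (needed for termination).
mutual
def parseF : (ts : List Tok) → Option {r : Int × List Tok // r.2.length < ts.length}
  | Tok.num n :: ts => some ⟨(n, ts), by simp⟩
  | Tok.lp :: ts =>
    match parseE ts with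
    | some ⟨(v, Tok.rp :: r), h⟩ => some ⟨(v, r), by simp at h ⊢; omega⟩
    | _ => none
  | _ => none
termination_by ts => (ts.length, 0)

def parseT : (ts : List Tok) → Option {r : Int × List Tok // r.2.length < ts.length}
  | ts =>
    match parseF ts with
    | some ⟨(v, r), h⟩ =>
      (parseTloop v r).map (fun s => ⟨s.val, lt_of_le_of_lt s.property h⟩)
    | none => none
termination_by ts => (ts.length, 1)

def parseTloop : (v : Int) → (ts : List Tok) → Option {r : Int × List Tok // r.2.length ≤ ts.length}
  | v, Tok.plus :: ts =>
    match parseF ts with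
    | some ⟨p, h⟩ =>
      (parseTloop (v + p.1) p.2).map
        (fun s => ⟨s.val, le_trans (le_trans s.property (le_of_lt h)) (Nat.le_succ _)⟩)
    | none => none
  | v, ts => some ⟨(v, ts), Nat.le_refl _⟩
termination_by v ts => (ts.length, 2)

def parseE : (ts : List Tok) → Option {r : Int × List Tok // r.2.length < ts.length}
  | ts =>
    match parseT ts with
    | some ⟨(v, r), h⟩ =>
      (parseEloop v r).map (fun s => ⟨s.val, lt_of_le_of_lt s.property h⟩)
    | none => none
termination_by ts => (ts.length, 4)

def parseEloop : (v : Int) → (ts : List Tok) → Option {r : Int × List Tok // r.2.length ≤ ts.length}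
  | v, Tok.mul :: ts =>
    match parseT ts with
    | some ⟨p, h⟩ =>
      (parseEloop (v * p.1) p.2).map
        (fun s => ⟨s.val, le_trans (le_trans s.property (le_of_lt h)) (Nat.le_succ _)⟩)
    | none => none
  | v, ts => some ⟨(v, ts), Nat.le_refl _⟩
termination_by v ts => (ts.length, 5)
end

def evaluate_plus_alt (calculation : String) : Int :=
  match parseE (tokenize calculation.toList) with
  | some r => r.val.1
  | none => 0  -- Python raises ValueError here; outside Pre_

-- ===== PRECONDITION & SPEC =====

-- shape check of the token stream: one complete infix expression (operands and binary
-- operators alternate, parentheses balanced); `e` = "an operand is expected", `d` = depth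
def wfTok : List Tok → Nat → Bool → Bool
  | [], d, e => !e && d == 0
  | Tok.num _ :: ts, d, true => wfTok ts d false
  | Tok.lp :: ts, d, true => wfTok ts (d + 1) true
  | Tok.plus :: ts, d, false => wfTok ts d true
  | Tok.mul :: ts, d, false => wfTok ts d true
  | Tok.rp :: ts, d + 1, false => wfTok ts d false
  | _, _, _ => false

-- Pre_ excludes malformed inputs whose token stream is not one complete well-formed
-- expression (unbalanced parentheses, missing operands/operators, trailing tokens):
-- there A raises IndexError or returns an accidental stack residue, and both behaviours
-- on such leftovers are equally defensible.
def Pre_evaluate_plus (calculation : String) : Prop :=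
  wfTok (tokenize calculation.toList) 0 true = true

instance (calculation : String) : Decidable (Pre_evaluate_plus calculation) := by
  unfold Pre_evaluate_plus; infer_instance

def pvWitness_evaluate_plus : String := "2 * 3 + (4 * 5)"

def Spec_evaluate_plus (calculation : String) (out : Int) : Prop := out = evaluate_plus_alt calculation
instance (calculation : String) (out : Int) : Decidable (Spec_evaluate_plus calculation out) := by unfold Spec_evaluate_plus; infer_instance

-- ===== CLAIM (what is proved, stated in full; the proofs are below) =====
def Claim_equal_evaluate_plus : Prop := ∀ (calculation : String), Dom_evaluate_plus calculation → Pre_evaluate_plus calculation → Spec_evaluate_plus calculation (evaluate_plus calculation)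

-- ===== LEMMAS AND PROOFS =====

-- The token-level machine equivalent to A's character loop
def tstep : List Int × List Char → Tok → List Int × List Char
  | (ns, os), Tok.num n => (n :: ns, os)
  | (ns, os), Tok.lp => (ns, '(' :: os)
  | (ns, os), Tok.rp => rpFlush ns os
  | (ns, os), Tok.plus => ((opFlush '+' ns os).1, '+' :: (opFlush '+' ns os).2)
  | (ns, os), Tok.mul => ((opFlush '*' ns os).1, '*' :: (opFlush '*' ns os).2)

def runT (ts : List Tok) (σ : List Int × List Char) : List Int × List Char := ts.foldl tstep σ

theorem runT_cons (t : Tok) (ts : List Tok) (σ : List Int × List Char) :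
    runT (t :: ts) σ = runT ts (tstep σ t) := rfl

theorem scanNum_eq (cs : List Char) (acc : Int) :
    scanNum acc cs = ((cs.takeWhile Char.isDigit).foldl (fun a d => a * 10 + digitVal d) acc,
      cs.dropWhile Char.isDigit) := by
  induction cs generalizing acc with
  | nil => simp [scanNum]
  | cons c cs ih =>
    by_cases h : c.isDigit <;>
      simp [scanNum, h, ih]

theorem tokenize0_digits (cs : List Char) (acc : Int) :
    tokenize0 (some acc) cs =
      Tok.num ((cs.takeWhile Char.isDigit).foldl (fun a d => a * 10 + digitVal d) acc)
        :: tokenize0 none (cs.dropWhile Char.isDigit) := by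
  induction cs generalizing acc with
  | nil => simp [tokenize0, pendList]
  | cons c cs ih =>
    by_cases h : c.isDigit
    · simp [tokenize0, h, ih]
    · simp [tokenize0, h, pendList]

theorem tokenize_cons_nondigit (c : Char) (cs : List Char) (h : c.isDigit = false) :
    tokenize (c :: cs) = symList c ++ tokenize cs := by
  simp [tokenize, tokenize0, h, pendList]

theorem aLoop_eq_runT : ∀ (n : Nat) (cs : List Char), cs.length ≤ n →
    ∀ ns os, aLoop cs ns os = runT (tokenize cs) (ns, os) := by
  intro n
  induction n with
  | zero =>
    intro cs h ns os
    have : cs = [] := List.eq_nil_of_length_eq_zero (Nat.le_zero.mp h)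
    subst this
    simp [aLoop, tokenize, tokenize0, pendList, runT]
  | succ n ih =>
    intro cs h ns os
    cases cs with
    | nil => simp [aLoop, tokenize, tokenize0, pendList, runT]
    | cons c cs =>
      simp only [List.length_cons, Nat.succ_le_succ_iff] at h
      by_cases hd : c.isDigit
      · have hsp : ¬ c = ' ' := fun e => absurd hd (by rw [e]; decide)
        have htok : tokenize (c :: cs) =
            Tok.num ((cs.takeWhile Char.isDigit).foldl (fun a d => a * 10 + digitVal d)
              (digitVal c))
              :: tokenize (cs.dropWhile Char.isDigit) := by
          simp [tokenize, tokenize0, hd, tokenize0_digits]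
        rw [aLoop, scanNum_eq, htok, runT_cons]
        simp only [hsp, hd, ite_true, ite_false, if_true, if_false, tstep]
        exact ih _ (le_trans (List.length_dropWhile_le _ _) h) _ _
      · by_cases hsp : c = ' '
        · subst hsp
          rw [aLoop, tokenize_cons_nondigit _ _ (by decide)]
          simp only [ite_true, if_true, symList]
          simp only [(by decide : (' ' = '+') = False), (by decide : (' ' = '*') = False),
            (by decide : (' ' = '(') = False), (by decide : (' ' = ')') = False),
            ite_false, if_false, List.nil_append]
          exact ih _ h _ _
        · by_cases hlp : c = '('
          · subst hlp
            rw [aLoop, tokenize_cons_nondigit _ _ (by decide)]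
            simp only [(by decide : ('(' : Char).isDigit = false),
              (by decide : ('(' = ' ') = False), (by decide : ('(' = '+') = False),
              (by decide : ('(' = '*') = False), Bool.false_eq_true, ite_false, if_false,
              ite_true, if_true, symList, List.cons_append, List.nil_append, runT_cons, tstep]
            exact ih _ h _ _
          · by_cases hrp : c = ')'
            · subst hrp
              rw [aLoop, tokenize_cons_nondigit _ _ (by decide)]
              simp only [(by decide : (')' : Char).isDigit = false),
                (by decide : (')' = ' ') = False), (by decide : (')' = '+') = False),
                (by decide : (')' = '*') = False), (by decide : (')' = '(') = False),
                Bool.false_eq_true, ite_false, if_false, ite_true, if_true, symList,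
                List.cons_append, List.nil_append, runT_cons, tstep]
              rw [ih _ h _ _]
            · by_cases hpl : c = '+'
              · subst hpl
                rw [aLoop, tokenize_cons_nondigit _ _ (by decide)]
                simp only [(by decide : ('+' : Char).isDigit = false),
                  (by decide : ('+' = ' ') = False), (by decide : ('+' = '(') = False),
                  (by decide : ('+' = ')') = False), (by decide : ('+' = '*') = False),
                  Bool.false_eq_true, ite_false, if_false, ite_true, if_true, symList,
                  List.cons_append, List.nil_append, runT_cons, tstep]
                rw [ih _ h _ _]
                simp
              · by_cases hmu : c = '*'
                · subst hmu
                  rw [aLoop, tokenize_cons_nondigit _ _ (by decide)]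
                  simp only [(by decide : ('*' : Char).isDigit = false),
                    (by decide : ('*' = ' ') = False), (by decide : ('*' = '(') = False),
                    (by decide : ('*' = ')') = False), (by decide : ('*' = '+') = False),
                    Bool.false_eq_true, ite_false, if_false, ite_true, if_true, symList,
                    List.cons_append, List.nil_append, runT_cons, tstep]
                  rw [ih _ h _ _]
                  simp
                · have hor : (c = '+' ∨ c = '*') = False := by
                    simp [hpl, hmu]
                  rw [aLoop, tokenize_cons_nondigit _ _ (by simpa using hd)]
                  simp only [hsp, hd, hlp, hrp, hpl, hmu, hor, Bool.false_eq_true,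
                    ite_false, if_false, symList, List.nil_append]
                  exact ih _ h _ _

-- invariant shapes of the stacks after a term / expression has been processed
def ShapeT (v : Int) (ns : List Int) (os : List Char) (σ : List Int × List Char) : Prop :=
  σ = (v :: ns, os) ∨ ∃ a b : Int, a + b = v ∧ σ = (b :: a :: ns, '+' :: os)

def ShapeE (v : Int) (ns : List Int) (os : List Char) (σ : List Int × List Char) : Prop :=
  σ = (v :: ns, os)
  ∨ (∃ a b : Int, a + b = v ∧ σ = (b :: a :: ns, '+' :: os))
  ∨ (∃ a b : Int, a * b = v ∧ σ = (b :: a :: ns, '*' :: os))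
  ∨ (∃ a b c : Int, a * (b + c) = v ∧ σ = (c :: b :: a :: ns, '+' :: '*' :: os))

def NotPlusHead (ts : List Tok) : Prop := ∀ ts', ts ≠ Tok.plus :: ts'
def NotMulHead (ts : List Tok) : Prop := ∀ ts', ts ≠ Tok.mul :: ts'

def pF (ts : List Tok) : Option (Int × List Tok) := (parseF ts).map Subtype.val
def pT (ts : List Tok) : Option (Int × List Tok) := (parseT ts).map Subtype.val
def pTl (v : Int) (ts : List Tok) : Option (Int × List Tok) := (parseTloop v ts).map Subtype.val
def pE (ts : List Tok) : Option (Int × List Tok) := (parseE ts).map Subtype.val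
def pEl (v : Int) (ts : List Tok) : Option (Int × List Tok) := (parseEloop v ts).map Subtype.val

theorem map_val_some {α : Type} {P : α → Prop} (o : Option {x // P x}) (p : α)
    (h : o.map Subtype.val = some p) : ∃ hp : P p, o = some ⟨p, hp⟩ := by
  cases o with
  | none => simp at h
  | some s =>
    obtain ⟨x, hx⟩ := s
    simp at h
    subst h
    exact ⟨hx, rfl⟩

theorem opFlush_plus_noop (ns : List Int) (os : List Char) (h : os.head? ≠ some '+') :
    opFlush '+' ns os = (ns, os) := by
  cases os with
  | nil => simp [opFlush]
  | cons o os =>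
    simp at h
    by_cases ho : o = '*'
    · subst ho; simp [opFlush, precedenceA]
    · simp [opFlush, precedenceA, h, ho]

theorem opFlush_mul_noop (ns : List Int) (os : List Char)
    (h1 : os.head? ≠ some '+') (h2 : os.head? ≠ some '*') :
    opFlush '*' ns os = (ns, os) := by
  cases os with
  | nil => simp [opFlush]
  | cons o os =>
    simp at h1 h2
    simp [opFlush, precedenceA, h1, h2]

theorem tstep_plus_shapeT (acc : Int) (ns : List Int) (os : List Char)
    (σ0 : List Int × List Char) (hsh : ShapeT acc ns os σ0) (h : os.head? ≠ some '+') :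
    tstep σ0 Tok.plus = (acc :: ns, '+' :: os) := by
  rcases hsh with h0 | ⟨a, b, hab, h0⟩ <;> subst h0
  · simp [tstep, opFlush_plus_noop _ _ h]
  · simp [tstep, opFlush, precedenceA, basicOps, opFlush_plus_noop _ _ h]
    omega

theorem tstep_mul_shapeE (acc : Int) (ns : List Int) (os : List Char)
    (σ0 : List Int × List Char) (hsh : ShapeE acc ns os σ0)
    (h1 : os.head? ≠ some '+') (h2 : os.head? ≠ some '*') :
    tstep σ0 Tok.mul = (acc :: ns, '*' :: os) := by
  rcases hsh with h0 | ⟨a, b, hab, h0⟩ | ⟨a, b, hab, h0⟩ | ⟨a, b, c, hab, h0⟩ <;> subst h0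
  · simp [tstep, opFlush_mul_noop _ _ h1 h2]
  · simp [tstep, opFlush, precedenceA, basicOps, opFlush_mul_noop _ _ h1 h2]
    omega
  · simp [tstep, opFlush, precedenceA, basicOps, opFlush_mul_noop _ _ h1 h2]
    rw [← hab]; ring
  · simp [tstep, opFlush, precedenceA, basicOps, opFlush_mul_noop _ _ h1 h2]
    rw [← hab]; ring

theorem rpFlush_shapeE (v : Int) (ns : List Int) (os : List Char)
    (σ : List Int × List Char) (hsh : ShapeE v ns ('(' :: os) σ) :
    tstep σ Tok.rp = (v :: ns, os) := by
  rcases hsh with h0 | ⟨a, b, hab, h0⟩ | ⟨a, b, hab, h0⟩ | ⟨a, b, c, hab, h0⟩ <;> subst h0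
  · simp [tstep, rpFlush]
  · simp [tstep, rpFlush, basicOps]
    omega
  · simp [tstep, rpFlush, basicOps]
    rw [← hab]; ring
  · simp [tstep, rpFlush, basicOps]
    rw [← hab]; ring

theorem finalFlush_shapeE (v : Int) (σ : List Int × List Char)
    (hsh : ShapeE v [] [] σ) : (finalFlush σ.1 σ.2).getLastD 0 = v := by
  rcases hsh with h0 | ⟨a, b, hab, h0⟩ | ⟨a, b, hab, h0⟩ | ⟨a, b, c, hab, h0⟩ <;> subst h0
  · simp [finalFlush]
  · simp [finalFlush, basicOps]
    omega
  · simp [finalFlush, basicOps]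
    rw [← hab]; ring
  · simp [finalFlush, basicOps]
    rw [← hab]; ring

theorem wfFalse_head (r : List Tok) (d : Nat) (h : wfTok r d false = true)
    (hp : NotPlusHead r) (hm : NotMulHead r) :
    (d = 0 ∧ r = []) ∨ ∃ d' r', d = d' + 1 ∧ r = Tok.rp :: r' ∧ wfTok r' d' false = true := by
  cases r with
  | nil =>
    left
    simp [wfTok] at h
    exact ⟨h, rfl⟩
  | cons t r' =>
    cases t with
    | num k => simp [wfTok] at h
    | plus => exact absurd rfl (hp r')
    | mul => exact absurd rfl (hm r')
    | lp => simp [wfTok] at h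
    | rp =>
      cases d with
      | zero => simp [wfTok] at h
      | succ d' => exact Or.inr ⟨d', r', rfl, rfl, h⟩

-- the five statements of the master induction
def PF (ts : List Tok) : Prop := ∀ d : Nat, wfTok ts d true = true →
  ∃ v r, pF ts = some (v, r) ∧ wfTok r d false = true ∧
    ∀ ns os, runT ts (ns, os) = runT r (v :: ns, os)

def PTl (ts : List Tok) : Prop := ∀ d : Nat, wfTok ts d false = true → ∀ acc : Int,
  ∃ v r, pTl acc ts = some (v, r) ∧ wfTok r d false = true ∧ NotPlusHead r ∧
    ∀ ns os σ0, os.head? ≠ some '+' → ShapeT acc ns os σ0 →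
      ∃ σ, runT ts σ0 = runT r σ ∧ ShapeT v ns os σ

def PT (ts : List Tok) : Prop := ∀ d : Nat, wfTok ts d true = true →
  ∃ v r, pT ts = some (v, r) ∧ wfTok r d false = true ∧ NotPlusHead r ∧
    ∀ ns os, os.head? ≠ some '+' →
      ∃ σ, runT ts (ns, os) = runT r σ ∧ ShapeT v ns os σ

def PEl (ts : List Tok) : Prop := ∀ d : Nat, wfTok ts d false = true → NotPlusHead ts → ∀ acc : Int,
  ∃ v r, pEl acc ts = some (v, r) ∧ wfTok r d false = true ∧ NotPlusHead r ∧ NotMulHead r ∧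
    ∀ ns os σ0, os.head? ≠ some '+' → os.head? ≠ some '*' → ShapeE acc ns os σ0 →
      ∃ σ, runT ts σ0 = runT r σ ∧ ShapeE v ns os σ

def PE (ts : List Tok) : Prop := ∀ d : Nat, wfTok ts d true = true →
  ∃ v r, pE ts = some (v, r) ∧ wfTok r d false = true ∧ NotPlusHead r ∧ NotMulHead r ∧
    ∀ ns os, os.head? ≠ some '+' → os.head? ≠ some '*' →
      ∃ σ, runT ts (ns, os) = runT r σ ∧ ShapeE v ns os σ

theorem master : ∀ n : Nat, ∀ ts : List Tok, ts.length ≤ n →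
    PF ts ∧ PTl ts ∧ PT ts ∧ PEl ts ∧ PE ts := by
  intro n
  induction n using Nat.strong_induction_on with
  | _ n IHn =>
  have IH : ∀ ts : List Tok, ts.length < n → PF ts ∧ PTl ts ∧ PT ts ∧ PEl ts ∧ PE ts :=
    fun ts h => IHn ts.length h ts (le_refl _)
  have hPF : ∀ ts : List Tok, ts.length ≤ n → PF ts := by
    intro ts hlen d hwf
    cases ts with
    | nil => simp [wfTok] at hwf
    | cons t ts' =>
      cases t with
      | num k =>
        refine ⟨k, ts', by simp [pF, parseF], by simpa [wfTok] using hwf, ?_⟩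
        intro ns os
        rfl
      | plus => simp [wfTok] at hwf
      | mul => simp [wfTok] at hwf
      | rp => simp [wfTok] at hwf
      | lp =>
        have hwf' : wfTok ts' (d + 1) true = true := by simpa [wfTok] using hwf
        have hlt : ts'.length < n := lt_of_lt_of_le (by simp) hlen
        obtain ⟨v, r, hmap, hwfr, hp, hm, hrun⟩ := (IH ts' hlt).2.2.2.2 (d + 1) hwf'
        rcases wfFalse_head r (d + 1) hwfr hp hm with ⟨h0, _⟩ | ⟨d', r', hd, hr, hwfr'⟩
        · omega
        · have hd' : d' = d := by omega
          subst hd'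
          subst hr
          obtain ⟨hlen2, hEeq⟩ := map_val_some _ _ hmap
          refine ⟨v, r', by simp [pF, parseF, hEeq], hwfr', ?_⟩
          intro ns os
          have h1 : runT (Tok.lp :: ts') (ns, os) = runT ts' (ns, '(' :: os) := rfl
          obtain ⟨σ, hσ, hsh⟩ := hrun ns ('(' :: os) (by intro hcon; simp at hcon)
            (by intro hcon; simp at hcon)
          rw [h1, hσ, runT_cons, rpFlush_shapeE v ns os σ hsh]
  have hPTl : ∀ ts : List Tok, ts.length ≤ n → PTl ts := by
    intro ts hlen d hwf acc
    cases ts with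
    | nil =>
      exact ⟨acc, [], by simp [pTl, parseTloop], hwf, fun ts' h => by simp at h,
        fun ns os σ0 hos hsh => ⟨σ0, rfl, hsh⟩⟩
    | cons t ts₂ =>
      cases t with
      | plus =>
        have hwf2 : wfTok ts₂ d true = true := by simpa [wfTok] using hwf
        have hl2 : ts₂.length ≤ n := le_trans (by simp) hlen
        obtain ⟨v₁, r₁, hmapF, hwfr₁, hrunF⟩ := hPF ts₂ hl2 d hwf2
        obtain ⟨hlF, hFeq⟩ := map_val_some _ _ hmapF
        have hl1 : r₁.length < n := lt_of_lt_of_le (lt_of_lt_of_le hlF (by simp)) hlen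
        obtain ⟨v, r, hmapTl, hwfr, hpr, hrunTl⟩ := (IH r₁ hl1).2.1 d hwfr₁ (acc + v₁)
        obtain ⟨hlTl, hTleq⟩ := map_val_some _ _ hmapTl
        refine ⟨v, r, ?_, hwfr, hpr, ?_⟩
        · simp [pTl, parseTloop, hFeq, hTleq]
        · intro ns os σ0 hos hsh
          have hstep : runT (Tok.plus :: ts₂) σ0 = runT ts₂ (acc :: ns, '+' :: os) := by
            rw [runT_cons, tstep_plus_shapeT acc ns os σ0 hsh hos]
          obtain ⟨σ, hσ, hshσ⟩ := hrunTl ns os (v₁ :: acc :: ns, '+' :: os) hos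
            (Or.inr ⟨acc, v₁, rfl, rfl⟩)
          exact ⟨σ, by rw [hstep, hrunF (acc :: ns) ('+' :: os), hσ], hshσ⟩
      | num k =>
        exact ⟨acc, Tok.num k :: ts₂, by simp [pTl, parseTloop], hwf, fun ts' h => by simp at h,
          fun ns os σ0 hos hsh => ⟨σ0, rfl, hsh⟩⟩
      | mul =>
        exact ⟨acc, Tok.mul :: ts₂, by simp [pTl, parseTloop], hwf, fun ts' h => by simp at h,
          fun ns os σ0 hos hsh => ⟨σ0, rfl, hsh⟩⟩
      | lp =>
        exact ⟨acc, Tok.lp :: ts₂, by simp [pTl, parseTloop], hwf, fun ts' h => by simp at h,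
          fun ns os σ0 hos hsh => ⟨σ0, rfl, hsh⟩⟩
      | rp =>
        exact ⟨acc, Tok.rp :: ts₂, by simp [pTl, parseTloop], hwf, fun ts' h => by simp at h,
          fun ns os σ0 hos hsh => ⟨σ0, rfl, hsh⟩⟩
  have hPT : ∀ ts : List Tok, ts.length ≤ n → PT ts := by
    intro ts hlen d hwf
    obtain ⟨v₁, r₁, hmapF, hwfr₁, hrunF⟩ := hPF ts hlen d hwf
    obtain ⟨hlF, hFeq⟩ := map_val_some _ _ hmapF
    have hl1 : r₁.length ≤ n := le_trans (le_of_lt hlF) hlen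
    obtain ⟨v, r, hmapTl, hwfr, hpr, hrunTl⟩ := hPTl r₁ hl1 d hwfr₁ v₁
    obtain ⟨hlTl, hTleq⟩ := map_val_some _ _ hmapTl
    refine ⟨v, r, ?_, hwfr, hpr, ?_⟩
    · simp [pT, parseT, hFeq, hTleq]
    · intro ns os hos
      obtain ⟨σ, hσ, hshσ⟩ := hrunTl ns os (v₁ :: ns, os) hos (Or.inl rfl)
      exact ⟨σ, by rw [hrunF ns os, hσ], hshσ⟩
  have hPEl : ∀ ts : List Tok, ts.length ≤ n → PEl ts := by
    intro ts hlen d hwf hnp acc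
    cases ts with
    | nil =>
      exact ⟨acc, [], by simp [pEl, parseEloop], hwf, hnp, fun ts' h => by simp at h,
        fun ns os σ0 h1 h2 hsh => ⟨σ0, rfl, hsh⟩⟩
    | cons t ts₂ =>
      cases t with
      | mul =>
        have hwf2 : wfTok ts₂ d true = true := by simpa [wfTok] using hwf
        have hl2 : ts₂.length ≤ n := le_trans (by simp) hlen
        obtain ⟨v₁, r₁, hmapT, hwfr₁, hpr₁, hrunT⟩ := hPT ts₂ hl2 d hwf2
        obtain ⟨hlT, hTeq⟩ := map_val_some _ _ hmapT
        have hl1 : r₁.length < n := lt_of_lt_of_le (lt_of_lt_of_le hlT (by simp)) hlen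
        obtain ⟨v, r, hmapEl, hwfr, hpr, hmr, hrunEl⟩ :=
          (IH r₁ hl1).2.2.2.1 d hwfr₁ hpr₁ (acc * v₁)
        obtain ⟨hlEl, hEleq⟩ := map_val_some _ _ hmapEl
        refine ⟨v, r, ?_, hwfr, hpr, hmr, ?_⟩
        · simp [pEl, parseEloop, hTeq, hEleq]
        · intro ns os σ0 h1 h2 hsh
          have hstep : runT (Tok.mul :: ts₂) σ0 = runT ts₂ (acc :: ns, '*' :: os) := by
            rw [runT_cons, tstep_mul_shapeE acc ns os σ0 hsh h1 h2]
          obtain ⟨σ1, hσ1, hshT⟩ := hrunT (acc :: ns) ('*' :: os) (by intro hcon; simp at hcon)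
          have hshE : ShapeE (acc * v₁) ns os σ1 := by
            rcases hshT with h0 | ⟨a, b, hab, h0⟩ <;> subst h0
            · exact Or.inr (Or.inr (Or.inl ⟨acc, v₁, rfl, rfl⟩))
            · exact Or.inr (Or.inr (Or.inr ⟨acc, a, b, by rw [hab], rfl⟩))
          obtain ⟨σ, hσ, hshσ⟩ := hrunEl ns os σ1 h1 h2 hshE
          exact ⟨σ, by rw [hstep, hσ1, hσ], hshσ⟩
      | plus => exact absurd rfl (hnp ts₂)
      | num k =>
        exact ⟨acc, Tok.num k :: ts₂, by simp [pEl, parseEloop], hwf, hnp,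
          fun ts' h => by simp at h, fun ns os σ0 h1 h2 hsh => ⟨σ0, rfl, hsh⟩⟩
      | lp =>
        exact ⟨acc, Tok.lp :: ts₂, by simp [pEl, parseEloop], hwf, hnp,
          fun ts' h => by simp at h, fun ns os σ0 h1 h2 hsh => ⟨σ0, rfl, hsh⟩⟩
      | rp =>
        exact ⟨acc, Tok.rp :: ts₂, by simp [pEl, parseEloop], hwf, hnp,
          fun ts' h => by simp at h, fun ns os σ0 h1 h2 hsh => ⟨σ0, rfl, hsh⟩⟩
  have hPE : ∀ ts : List Tok, ts.length ≤ n → PE ts := by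
    intro ts hlen d hwf
    obtain ⟨v₁, r₁, hmapT, hwfr₁, hpr₁, hrunT⟩ := hPT ts hlen d hwf
    obtain ⟨hlT, hTeq⟩ := map_val_some _ _ hmapT
    have hl1 : r₁.length ≤ n := le_trans (le_of_lt hlT) hlen
    obtain ⟨v, r, hmapEl, hwfr, hpr, hmr, hrunEl⟩ := hPEl r₁ hl1 d hwfr₁ hpr₁ v₁
    obtain ⟨hlEl, hEleq⟩ := map_val_some _ _ hmapEl
    refine ⟨v, r, ?_, hwfr, hpr, hmr, ?_⟩
    · simp [pE, parseE, hTeq, hEleq]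
    · intro ns os h1 h2
      obtain ⟨σ1, hσ1, hshT⟩ := hrunT ns os h1
      have hshE : ShapeE v₁ ns os σ1 := by
        rcases hshT with h0 | ⟨a, b, hab, h0⟩ <;> subst h0
        · exact Or.inl rfl
        · exact Or.inr (Or.inl ⟨a, b, hab, rfl⟩)
      obtain ⟨σ, hσ, hshσ⟩ := hrunEl ns os σ1 h1 h2 hshE
      exact ⟨σ, by rw [hσ1, hσ], hshσ⟩
  exact fun ts h => ⟨hPF ts h, hPTl ts h, hPT ts h, hPEl ts h, hPE ts h⟩


-- ===== VERDICT (by name: the statement is the Claim_ definition above) =====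
theorem evaluate_plus_spec : Claim_equal_evaluate_plus := by
  intro calculation _ hpre
  unfold Spec_evaluate_plus
  unfold Pre_evaluate_plus at hpre
  obtain ⟨_, _, _, _, hPE⟩ := master (tokenize calculation.toList).length _ (le_refl _)
  obtain ⟨v, r, hmap, hwf, hp, hm, hrun⟩ := hPE 0 hpre
  have hr : r = [] := by
    rcases wfFalse_head r 0 hwf hp hm with ⟨_, h⟩ | ⟨d', r', hd, _⟩
    · exact h
    · omega
  subst hr
  obtain ⟨hlen, hEeq⟩ := map_val_some _ _ hmap
  have hb : evaluate_plus_alt calculation = v := by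
    unfold evaluate_plus_alt
    rw [hEeq]
  rw [hb]
  obtain ⟨σ, hσ, hshape⟩ := hrun [] [] (by simp) (by simp)
  show (fun p => (finalFlush p.1 p.2).getLastD 0) (aLoop calculation.toList [] []) = v
  rw [aLoop_eq_runT calculation.toList.length calculation.toList (le_refl _), hσ]
  exact finalFlush_shapeE v σ hshape
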